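-- pv_equiv track=rewrite | github.com/weiyangzen/awesome_algorithms | Algorithms/计算机-动态规划-0063-最短超串问题/demo.py | normalize_words
-- ===== SOURCE A (Python) =====
-- def validate_words(words: list[str]) -> list[str]:
--     """Validate raw input word list."""
--     if not isinstance(words, list):
--         raise TypeError(f"words must be list[str], got {type(words).__name__}")
--     if not words:
--         raise ValueError("words must not be empty")
--     if any((not isinstance(w, str)) for w in words):
--         raise TypeError("each word must be str")
--     if any((w == "") for w in words):
--         raise ValueError("empty string is not supported in this MVP")
--     return words
--
-- def normalize_words(words: list[str]) -> list[str]: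
--     """Deduplicate and remove words fully contained in others.
--
--     This normalization keeps the optimization target unchanged while reducing
--     DP state count and improving determinism.
--     """
--     raw = validate_words(words)
--     unique = sorted(set(raw))
--
--     reduced: list[str] = []
--     for w in unique:
--         contained = False
--         for other in unique:
--             if w != other and w in other:
--                 contained = True
--                 break
--         if not contained:
--             reduced.append(w)
--
--     return sorted(reduced)
-- ===== SOURCE B (Python) =====
-- def normalize_words(words: list[str]) -> list[str]:
--     """Deduplicate and remove words fully contained in others.
--
--     Processes the distinct words in decreasing length order, so a word only
--     needs to be checked against the (longer) words already kept: a word that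
--     is contained in some other word is always contained in a kept one.
--     """
--     by_len = sorted(sorted(set(words)), key=len, reverse=True)
--     kept: list[str] = []
--     for w in by_len:
--         if not any(w in k for k in kept):
--             kept.append(w)
--     return sorted(kept)
-- ===== Notes on version B (the rewrite author's own statement) =====
-- stated objective: faster
-- what changed: A checks every unique word against every other unique word; B sorts the unique words by decreasing length and checks each word only against the words already kept (containment is transitive, so a maximal container is always kept), removing the full inner scan.
import Mathlib
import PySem

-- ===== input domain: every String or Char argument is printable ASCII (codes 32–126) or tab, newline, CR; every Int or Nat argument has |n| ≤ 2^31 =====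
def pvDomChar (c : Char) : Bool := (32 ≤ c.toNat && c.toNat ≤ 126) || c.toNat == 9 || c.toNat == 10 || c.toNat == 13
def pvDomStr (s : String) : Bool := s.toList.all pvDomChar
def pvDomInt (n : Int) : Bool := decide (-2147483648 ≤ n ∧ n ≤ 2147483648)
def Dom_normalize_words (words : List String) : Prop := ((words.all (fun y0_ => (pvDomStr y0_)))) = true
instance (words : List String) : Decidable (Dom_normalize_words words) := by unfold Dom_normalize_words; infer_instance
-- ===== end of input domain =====

-- B processes the distinct words in decreasing length order and tests each word only
-- against the already-kept (maximal) words, instead of A's scan of every unique word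
-- against every other unique word. Return-value equivalence; A's validation raises are
-- excluded by Pre_ (B simply returns the normalized list there).

-- ===== PORT A =====
-- inner 'for other in unique: if w != other and w in other: contained = True; break'
def pvContainedLoop (w : String) : List String → Bool
  | [] => false
  | o :: rest => if w != o && PySem.Str.isIn w o then true else pvContainedLoop w rest

def normalize_words (words : List String) : List String :=
  let unique := PySem.List.sorted (PySem.Set.ofList words) (fun x => x) false
  let reduced := unique.foldl (fun reduced w =>
    let contained := pvContainedLoop w unique
    if !contained then reduced ++ [w] else reduced) []
  PySem.List.sorted reduced (fun x => x) false

-- ===== PORT B =====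
def normalize_words_alt (words : List String) : List String :=
  let by_len := PySem.List.sorted
    (PySem.List.sorted (PySem.Set.ofList words) (fun x => x) false)
    (fun w => PySem.Str.len w) true
  let kept := by_len.foldl (fun kept w =>
    if kept.any (fun k => PySem.Str.isIn w k) then kept else kept ++ [w]) []
  PySem.List.sorted kept (fun x => x) false

-- ===== PRECONDITION & SPEC =====
-- Pre_ excludes exactly the inputs on which A's validate_words raises: the empty list
-- (ValueError) and lists containing the empty string (ValueError).
def Pre_normalize_words (words : List String) : Prop := words ≠ [] ∧ "" ∉ words
instance (words : List String) : Decidable (Pre_normalize_words words) := by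
  unfold Pre_normalize_words; infer_instance

def pvWitness_normalize_words : List String := ["ab", "b", "xabc"]

def Spec_normalize_words (words : List String) (out : List String) : Prop :=
  out = normalize_words_alt words
instance (words : List String) (out : List String) : Decidable (Spec_normalize_words words out) := by
  unfold Spec_normalize_words; infer_instance

-- ===== CLAIM (what is proved, stated in full; the proofs are below) =====
def Claim_equal_normalize_words : Prop := ∀ (words : List String),
  Dom_normalize_words words → Pre_normalize_words words →
  Spec_normalize_words words (normalize_words words)

-- ===== LEMMAS AND PROOFS =====

-- "w is maximal in U": no other word of U contains it
def pvMax (U : List String) (w : String) : Bool :=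
  U.all (fun o => w == o || !PySem.Str.isIn w o)

theorem pvContainedLoop_eq (w : String) (us : List String) :
    pvContainedLoop w us = !pvMax us w := by
  induction us with
  | nil => simp [pvContainedLoop, pvMax]
  | cons o rest ih =>
    simp only [pvContainedLoop, ih, pvMax, List.all_cons]
    cases h1 : (w == o) <;> cases h2 : PySem.Str.isIn w o <;> simp [h1, h2, bne]

theorem pvMax_true_iff (U : List String) (w : String) :
    pvMax U w = true ↔ ∀ o ∈ U, o ≠ w → ¬ (w.toList <:+: o.toList) := by
  simp only [pvMax, List.all_eq_true]
  constructor
  · intro h o ho hne hinf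
    rcases Bool.or_eq_true .. |>.mp (h o ho) with h1 | h1
    · exact hne (beq_iff_eq.mp h1).symm
    · rw [Bool.not_eq_true'] at h1
      exact absurd ((PySem.Str.isIn_iff_infix w o).mpr hinf)
        (fun hc => Bool.noConfusion (hc.symm.trans h1))
  · intro h o ho
    rcases eq_or_ne w o with rfl | hne
    · simp
    · have hni : ¬ w.toList <:+: o.toList := h o ho (Ne.symm hne)
      have hf : PySem.Str.isIn w o = false := by
        cases hb : PySem.Str.isIn w o
        · rfl
        · exact absurd ((PySem.Str.isIn_iff_infix w o).mp hb) hni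
      rw [Bool.or_eq_true, hf]
      right
      rfl

-- strict-length fact for a proper containment
theorem infix_len_lt {w o : String} (hne : o ≠ w) (hinf : w.toList <:+: o.toList) :
    w.toList.length < o.toList.length := by
  rcases Nat.lt_or_ge w.toList.length o.toList.length with h | h
  · exact h
  · exfalso
    have hlen : w.toList.length = o.toList.length :=
      Nat.le_antisymm hinf.length_le h
    have : w.toList = o.toList := hinf.eq_of_length hlen
    exact hne (String.toList_injective this).symm

def pvMaxLen (U : List String) : Nat := (U.map fun s => s.toList.length).foldr max 0

theorem le_pvMaxLen (U : List String) : ∀ o ∈ U, o.toList.length ≤ pvMaxLen U := by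
  induction U with
  | nil => intro o h; cases h
  | cons a t ih =>
    intro o h
    rcases List.mem_cons.mp h with rfl | h
    · simp [pvMaxLen, List.map_cons, List.foldr_cons]
    · calc o.toList.length ≤ pvMaxLen t := ih o h
        _ ≤ pvMaxLen (a :: t) := by
          simp [pvMaxLen, List.map_cons, List.foldr_cons]

-- every word of U is (equal to or properly contained in) some maximal word of U
theorem exists_dominating (U : List String) :
    ∀ (k : Nat) (w : String), w ∈ U → pvMaxLen U - w.toList.length ≤ k →
    ∃ m ∈ U, pvMax U m = true ∧
      (m = w ∨ (w.toList <:+: m.toList ∧ w.toList.length < m.toList.length)) := by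
  intro k
  induction k with
  | zero =>
    intro w hw hk
    cases hM : pvMax U w
    · exfalso
      have : ∃ o ∈ U, o ≠ w ∧ w.toList <:+: o.toList := by
        by_contra hc
        push Not at hc
        exact absurd ((pvMax_true_iff U w).mpr (fun o ho hne => hc o ho hne)) (by simp [hM])
      rcases this with ⟨o, ho, hne, hinf⟩
      have h1 := infix_len_lt hne hinf
      have h2 := le_pvMaxLen U o ho
      omega
    · exact ⟨w, hw, hM, Or.inl rfl⟩
  | succ k ih =>
    intro w hw hk
    cases hM : pvMax U w
    · have : ∃ o ∈ U, o ≠ w ∧ w.toList <:+: o.toList := by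
        by_contra hc
        push Not at hc
        exact absurd ((pvMax_true_iff U w).mpr (fun o ho hne => hc o ho hne)) (by simp [hM])
      rcases this with ⟨o, ho, hne, hinf⟩
      have h1 := infix_len_lt hne hinf
      have h2 := le_pvMaxLen U o ho
      rcases ih o ho (by omega) with ⟨m, hm, hmax, hcase⟩
      refine ⟨m, hm, hmax, Or.inr ?_⟩
      rcases hcase with rfl | ⟨hinf2, hlt⟩
      · exact ⟨hinf, h1⟩
      · exact ⟨hinf.trans hinf2, by omega⟩
    · exact ⟨w, hw, hM, Or.inl rfl⟩

-- the greedy step over the length-sorted list keeps exactly the maximal words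
theorem greedy_filter (U L : List String) (hperm : L.Perm U) (hnodup : L.Nodup)
    (hdesc : L.Pairwise (fun a b => b.toList.length ≤ a.toList.length)) :
    ∀ (s p : List String), L = p ++ s →
      (s.foldl (fun kept w =>
        if kept.any (fun k => PySem.Str.isIn w k) then kept else kept ++ [w])
        (p.filter (fun w => pvMax U w))) = L.filter (fun w => pvMax U w) := by
  intro s
  induction s with
  | nil => intro p hp; simp [hp]
  | cons w s' ih =>
    intro p hp
    have hwL : w ∈ L := by rw [hp]; simp
    have step : (if (p.filter (fun w => pvMax U w)).any (fun k => PySem.Str.isIn w k)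
        then p.filter (fun w => pvMax U w)
        else p.filter (fun w => pvMax U w) ++ [w]) = (p ++ [w]).filter (fun w => pvMax U w) := by
      cases hM : pvMax U w
      · -- w not maximal: some kept (maximal, longer) word of p contains w
        have hwU : w ∈ U := hperm.mem_iff.mp hwL
        have : ∃ o ∈ U, o ≠ w ∧ w.toList <:+: o.toList := by
          by_contra hc
          push Not at hc
          exact absurd ((pvMax_true_iff U w).mpr (fun o ho hne => hc o ho hne)) (by simp [hM])
        rcases this with ⟨o, ho, hne, hinf⟩
        rcases exists_dominating U (pvMaxLen U) o ho (by omega) with ⟨m, hmU, hmax, hcase⟩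
        have hminf : w.toList <:+: m.toList ∧ w.toList.length < m.toList.length := by
          rcases hcase with rfl | ⟨h2, h3⟩
          · exact ⟨hinf, infix_len_lt hne hinf⟩
          · exact ⟨hinf.trans h2, lt_trans (infix_len_lt hne hinf) h3⟩
        have hmL : m ∈ L := hperm.mem_iff.mpr hmU
        have hmp : m ∈ p := by
          rw [hp] at hmL
          rcases List.mem_append.mp hmL with h | h
          · exact h
          · exfalso
            rcases List.mem_cons.mp h with rfl | h
            · exact lt_irrefl _ hminf.2
            · have hP : (p ++ w :: s').Pairwise (fun a b => b.toList.length ≤ a.toList.length) :=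
                hp ▸ hdesc
              have h3 := (List.pairwise_cons.mp (List.pairwise_append.mp hP).2.1).1 m h
              omega
        have hany : (p.filter (fun w => pvMax U w)).any (fun k => PySem.Str.isIn w k) = true := by
          refine List.any_eq_true.mpr ⟨m, List.mem_filter.mpr ⟨hmp, hmax⟩, ?_⟩
          exact (PySem.Str.isIn_iff_infix w m).mpr hminf.1
        rw [hany]
        simp [List.filter_append, hM]
      · -- w maximal: no kept word contains it
        have hany : (p.filter (fun w => pvMax U w)).any (fun k => PySem.Str.isIn w k) = false := by
          rw [List.any_eq_false]
          intro k hk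
          have hkp : k ∈ p := (List.mem_filter.mp hk).1
          have hkU : k ∈ U := hperm.mem_iff.mp (by rw [hp]; exact List.mem_append.mpr (Or.inl hkp))
          have hkw : k ≠ w := by
            rintro rfl
            have := hp ▸ hnodup
            rcases List.nodup_append.mp this with ⟨_, _, hdisj⟩
            exact hdisj k hkp k (List.mem_cons_self ..) rfl
          intro hIn
          exact (pvMax_true_iff U w).mp hM k hkU hkw ((PySem.Str.isIn_iff_infix w k).mp hIn)
        rw [hany]
        simp [List.filter_append, hM]
    rw [List.foldl_cons, step, ih (p ++ [w]) (by simpa using hp)]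

-- the result of A's double loop, in list form
theorem A_eq_filter (words : List String) :
    normalize_words words =
      (PySem.List.sorted (PySem.Set.ofList words) (fun x => x) false).filter
        (fun w => pvMax (PySem.List.sorted (PySem.Set.ofList words) (fun x => x) false) w) := by
  unfold normalize_words
  set U := PySem.List.sorted (PySem.Set.ofList words) (fun x => x) false with hUdef
  have hU_lt : U.Pairwise (fun a b => a < b) := PySem.List.sorted_ofList_pairwise_lt words
  have hfold : U.foldl (fun reduced w =>
      let contained := pvContainedLoop w U
      if !contained then reduced ++ [w] else reduced) [] =
      U.filter (fun w => !pvContainedLoop w U) := by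
    exact PySem.List.foldl_append_if_eq_filter (fun w => !pvContainedLoop w U) U []
  simp only [hfold]
  have hfeq : U.filter (fun w => !pvContainedLoop w U) = U.filter (fun w => pvMax U w) := by
    apply List.filter_congr
    intro x _
    rw [pvContainedLoop_eq, Bool.not_not]
  rw [hfeq]
  apply PySem.List.sorted_eq_self_of_pairwise
  exact (hU_lt.filter _).imp le_of_lt

theorem B_eq_filter (words : List String) :
    normalize_words_alt words =
      (PySem.List.sorted (PySem.Set.ofList words) (fun x => x) false).filter
        (fun w => pvMax (PySem.List.sorted (PySem.Set.ofList words) (fun x => x) false) w) := by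
  unfold normalize_words_alt
  set U := PySem.List.sorted (PySem.Set.ofList words) (fun x => x) false with hUdef
  set L := PySem.List.sorted U (fun w => PySem.Str.len w) true with hLdef
  have hU_lt : U.Pairwise (fun a b => a < b) := PySem.List.sorted_ofList_pairwise_lt words
  have hUnodup : U.Nodup := hU_lt.imp ne_of_lt
  have hperm : L.Perm U := PySem.List.sorted_perm U _ true
  have hnodup : L.Nodup := hperm.symm.nodup hUnodup
  have hdesc : L.Pairwise (fun a b => b.toList.length ≤ a.toList.length) := by
    have := PySem.List.sorted_pairwise_rev U (fun w => PySem.Str.len w)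
    refine this.imp ?_
    intro a b h
    simp only [PySem.Str.len_eq] at h
    exact_mod_cast h
  have hkept := greedy_filter U L hperm hnodup hdesc L [] rfl
  simp only [List.filter_nil] at hkept
  simp only []
  rw [hkept]
  apply PySem.List.sorted_eq_of_perm_of_pairwise_lt
  · exact (hperm.filter _).symm
  · exact hU_lt.filter _

-- ===== VERDICT (by name: the statement is the Claim_ definition above) =====
theorem normalize_words_spec : Claim_equal_normalize_words := by
  intro words _ _
  unfold Spec_normalize_words
  rw [A_eq_filter, B_eq_filter]
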